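-- pv_equiv track=rewrite | github.com/boonepeter/franklin-api | app/rosalind/lexv.py | lex_permutations
-- ===== SOURCE A (Python) =====
-- from typing import List
-- from itertools import product
--
-- def lex_permutations(alphabet: List[str], length: int, to_sort: bool=True):
--     prods = []
--     for i in range(length):
--         prods.extend([p for p in product(alphabet, repeat=i + 1)])
--     joined = ["".join(p) for p in prods]
--     if to_sort:
--         joined = sorted(joined, key=lambda word: [alphabet.index(c) for c in word])
--     return joined
-- ===== SOURCE B (Python) =====
-- def lex_permutations(alphabet, length, to_sort=True):
--     words = []
--     level = [""]
--     for _ in range(length):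
--         level = [w + a for w in level for a in alphabet]
--         words.extend(level)
--     if not to_sort:
--         return words
--     rank = {}
--     for i, a in enumerate(alphabet):
--         rank.setdefault(a, i)
--     pairs = [(w, [rank[c] for c in w]) for w in words]
--     out = []
--     stack = [(pairs, 0)]
--     while stack:
--         ps, pos = stack.pop()
--         for w, k in ps:
--             if len(k) == pos:
--                 out.append(w)
--         tail = [p for p in ps if len(p[1]) > pos]
--         buckets = [[p for p in tail if p[1][pos] == r] for r in range(len(alphabet))]
--         for b in reversed(buckets):
--             if b:
--                 stack.append((b, pos + 1))
--     return out
-- ===== Notes on version B (the rewrite author's own statement) =====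
-- stated objective: alternative
-- what changed: Replaces the comparison sort keyed by per-character alphabet.index calls with an MSD radix sort: char ranks are precomputed once into a dict, each word is paired with its rank list, and an explicit work stack repeatedly emits finished words and partitions the rest into per-rank buckets, so no key comparisons or sort are performed.
import Mathlib
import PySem

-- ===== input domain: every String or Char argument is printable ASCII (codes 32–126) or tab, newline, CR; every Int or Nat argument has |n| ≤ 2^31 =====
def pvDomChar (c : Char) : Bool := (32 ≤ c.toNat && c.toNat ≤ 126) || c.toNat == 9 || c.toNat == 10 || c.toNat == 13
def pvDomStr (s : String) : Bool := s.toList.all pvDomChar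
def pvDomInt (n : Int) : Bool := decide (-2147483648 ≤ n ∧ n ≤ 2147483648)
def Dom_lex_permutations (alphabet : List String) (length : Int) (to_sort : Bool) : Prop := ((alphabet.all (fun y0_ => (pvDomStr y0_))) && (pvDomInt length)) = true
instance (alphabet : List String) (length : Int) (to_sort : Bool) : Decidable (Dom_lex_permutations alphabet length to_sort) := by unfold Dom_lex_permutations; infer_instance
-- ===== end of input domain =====

-- B replaces "sort with a per-character alphabet.index key" by an MSD radix sort (bucket
-- partition by rank position, driven by an explicit work stack), with the char ranks
-- precomputed once into a dict (objective: alternative; not claimed faster).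

-- ===== PORT A =====
-- itertools.product(alphabet, repeat=k) in product order (the documented equivalent loop:
-- result = [x+[y] for x in result for y in pool], once per repeat)
def pyProd (alphabet : List String) : Nat → List (List String)
  | 0 => [[]]
  | k+1 => (pyProd alphabet k).flatMap (fun t => alphabet.map (fun a => t ++ [a]))

def lex_permutations (alphabet : List String) (length : Int) (to_sort : Bool) : List String :=
  let prods := (PySem.List.pyRange 0 length 1).foldl
    (fun prods i => prods ++ pyProd alphabet (i + 1).toNat) []
  let joined := prods.map (fun p => PySem.Str.join "" p)
  if to_sort then
    -- alphabet.index(c) raises ValueError when c is absent; Pre_ excludes exactly those inputs, so getD 0 is exact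
    PySem.List.sorted joined
      (fun word => word.toList.map (fun c => (((PySem.List.index? alphabet (String.mk [c])).getD 0 : Nat) : Int)))
  else joined

-- ===== PORT B =====
-- weight bookkeeping used only to justify termination of the work-stack loop
def pairWeight (pos : Nat) (p : String × List Int) : Nat := 1 + p.2.length - pos
def entryWeight (e : List (String × List Int) × Nat) : Nat := (e.1.map (pairWeight e.2)).sum
def msdMeasure (stack : List (List (String × List Int) × Nat)) : Nat := (stack.map entryWeight).sum

theorem sum_indicator_range (m : Nat) (v : Int) (c : Nat) :
    (((List.range m).map (fun (r : Nat) => if v == (r : Int) then c else 0)).sum)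
      = if 0 ≤ v ∧ v < (m : Int) then c else 0 := by
  induction m with
  | zero =>
    simp only [List.range_zero, List.map_nil, List.sum_nil]
    have h : ¬(0 ≤ v ∧ v < ((0 : Nat) : Int)) := by omega
    rw [if_neg h]
  | succ m ih =>
    rw [List.range_succ, List.map_append, List.sum_append, ih]
    simp only [List.map_cons, List.map_nil, List.sum_cons, List.sum_nil]
    by_cases h : v = (m : Int)
    · subst h
      simp only [beq_self_eq_true, if_true]
      push_cast
      split_ifs <;> omega
    · have hb : (v == (m : Int)) = false := by simp [h]
      rw [hb]
      simp only [Bool.false_eq_true, if_false]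
      push_cast
      split_ifs <;> omega

theorem sum_buckets_le (tl : List (String × List Int)) (pos : Nat) (m : Nat)
    (g : String × List Int → Nat) :
    (((List.range m).map (fun (r : Nat) => ((tl.filter (fun p => p.2[pos]?.getD 0 == (r : Int))).map g).sum)).sum)
      ≤ (tl.map g).sum := by
  induction tl with
  | nil => simp
  | cons p t ih =>
    have hstep : ∀ r : Nat,
        ((List.filter (fun q => q.2[pos]?.getD 0 == ((r : Nat) : Int)) (p :: t)).map g).sum
          = (if p.2[pos]?.getD 0 == (r : Int) then g p else 0)
            + ((t.filter (fun q => q.2[pos]?.getD 0 == (r : Int))).map g).sum := by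
      intro r
      by_cases h : p.2[pos]?.getD 0 == (r : Int) <;> simp [h]
    have hmc : (((List.range m).map (fun (r : Nat) => ((List.filter (fun q => q.2[pos]?.getD 0 == (r : Int)) (p :: t)).map g).sum)).sum)
        = (((List.range m).map (fun (r : Nat) => (if p.2[pos]?.getD 0 == (r : Int) then g p else 0)
            + ((t.filter (fun q => q.2[pos]?.getD 0 == (r : Int))).map g).sum)).sum) := by
      apply congrArg
      exact List.map_congr_left (fun r _ => hstep r)
    rw [hmc, List.sum_map_add]
    have h1 := sum_indicator_range m (p.2[pos]?.getD 0) (g p)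
    have h2 : (((List.range m).map (fun (r : Nat) => if p.2[pos]?.getD 0 == (r : Int) then g p else 0)).sum) ≤ g p := by
      rw [h1]; split_ifs <;> omega
    simp only [List.map_cons, List.sum_cons]
    exact Nat.add_le_add h2 ih

theorem msd_decr (m : Nat) (ps : List (String × List Int)) (pos : Nat)
    (rest : List (List (String × List Int) × Nat)) :
    msdMeasure (((((List.range m).map (fun (r : Nat) => (ps.filter (fun p => pos < p.2.length)).filter (fun p => p.2[pos]?.getD 0 == (r : Int)))).filter (fun b => !b.isEmpty)).map (fun b => (b, pos + 1))) ++ rest)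
      + (((((List.range m).map (fun (r : Nat) => (ps.filter (fun p => pos < p.2.length)).filter (fun p => p.2[pos]?.getD 0 == (r : Int)))).filter (fun b => !b.isEmpty)).map (fun b => (b, pos + 1))) ++ rest).length
    < msdMeasure ((ps, pos) :: rest) + ((ps, pos) :: rest).length := by
  have w0succ : ∀ q : String × List Int, pos < q.2.length →
      pairWeight (pos + 1) q + 1 = pairWeight pos q := by
    intro q h; unfold pairWeight; omega
  set tl := ps.filter (fun p => decide (pos < p.2.length)) with htl
  set buckets := (List.range m).map (fun (r : Nat) => tl.filter (fun p => p.2[pos]?.getD 0 == (r : Int))) with hbk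
  set filt := buckets.filter (fun b => !b.isEmpty) with hfilt
  have key : (filt.map (fun b => (b.map (pairWeight (pos + 1))).sum + 1)).sum ≤ (ps.map (pairWeight pos)).sum := by
    have hF : (filt.map (fun b => (b.map (pairWeight (pos + 1))).sum + 1)).sum
        = (filt.map (fun b => (b.map (pairWeight (pos + 1))).sum + (if b.isEmpty then 0 else 1))).sum := by
      apply congrArg
      apply List.map_congr_left
      intro b hb
      have : b.isEmpty = false := by
        have := List.of_mem_filter hb
        simpa using this
      rw [this]
      simp
    rw [hF]
    have hsub : (filt.map (fun b => (b.map (pairWeight (pos + 1))).sum + (if b.isEmpty then 0 else 1))).Sublist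
        (buckets.map (fun b => (b.map (pairWeight (pos + 1))).sum + (if b.isEmpty then 0 else 1))) :=
      (List.filter_sublist (l := buckets)).map _
    have h1 : (filt.map (fun b => (b.map (pairWeight (pos + 1))).sum + (if b.isEmpty then 0 else 1))).sum
        ≤ (buckets.map (fun b => (b.map (pairWeight (pos + 1))).sum + (if b.isEmpty then 0 else 1))).sum :=
      hsub.sum_le_sum (by intro a _; exact Nat.zero_le a)
    have h2 : (buckets.map (fun b => (b.map (pairWeight (pos + 1))).sum + (if b.isEmpty then 0 else 1))).sum
        ≤ (buckets.map (fun b => (b.map (pairWeight pos)).sum)).sum := by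
      apply List.sum_le_sum
      intro b hb
      rw [hbk] at hb
      obtain ⟨r, _, hr⟩ := List.mem_map.mp hb
      have hmem : ∀ q ∈ b, pos < q.2.length := by
        intro q hq
        rw [← hr] at hq
        have hq2 := List.mem_of_mem_filter hq
        have := List.of_mem_filter hq2
        simpa using this
      have hsum : (b.map (pairWeight pos)).sum = (b.map (fun q => pairWeight (pos + 1) q + 1)).sum := by
        apply congrArg
        apply List.map_congr_left
        intro q hq
        exact (w0succ q (hmem q hq)).symm
      rw [hsum, List.sum_map_add]
      have hlen : (b.map (fun _ => 1)).sum = b.length := by simp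
      have hie : (if b.isEmpty then 0 else 1) ≤ b.length := by cases b <;> simp
      omega
    have h3 : (buckets.map (fun b => (b.map (pairWeight pos)).sum)).sum ≤ (tl.map (pairWeight pos)).sum := by
      rw [hbk, List.map_map]
      exact sum_buckets_le tl pos m (pairWeight pos)
    have h4 : (tl.map (pairWeight pos)).sum ≤ (ps.map (pairWeight pos)).sum := by
      refine List.Sublist.sum_le_sum ?_ (by intro a _; exact Nat.zero_le a)
      rw [htl]
      exact (List.filter_sublist (l := ps)).map _
    omega
  unfold msdMeasure entryWeight
  simp only [List.map_append, List.sum_append, List.map_map, List.length_append,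
    List.map_cons, List.sum_cons, List.length_cons, List.length_map, Function.comp_def]
  have hkey2 : (filt.map (fun b => (b.map (pairWeight (pos + 1))).sum + 1)).sum
      = (filt.map (fun b => (b.map (pairWeight (pos + 1))).sum)).sum + filt.length := by
    rw [List.sum_map_add]
    simp
  omega

-- the MSD radix sort work-stack loop of B ('while stack: ...'); the Lean list's head is the
-- Python stack's top (Python appends the nonempty buckets reversed and pops from the end,
-- which is the same pop order); p.2[pos]?.getD 0 is Python's p[1][pos], exact because the
-- bucket filter only tests it when pos < len(p[1])
def msdLoop (m : Nat) (stack : List (List (String × List Int) × Nat)) (out : List String) : List String :=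
  match stack with
  | [] => out
  | (ps, pos) :: rest =>
    let out' := out ++ (ps.filter (fun p => p.2.length == pos)).map (fun p => p.1)
    let tl := ps.filter (fun p => pos < p.2.length)
    let buckets := (List.range m).map (fun (r : Nat) => tl.filter (fun p => p.2[pos]?.getD 0 == (r : Int)))
    msdLoop m (((buckets.filter (fun b => !b.isEmpty)).map (fun b => (b, pos + 1))) ++ rest) out'
termination_by msdMeasure stack + stack.length
decreasing_by
  rw [List.unattach_filter (g := fun p => decide (pos < p.2.length)) (hf := fun x h => rfl),
    List.unattach_attach]
  exact msd_decr m ps pos rest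

def lex_permutations_alt (alphabet : List String) (length : Int) (to_sort : Bool) : List String :=
  let wl := (PySem.List.pyRange 0 length 1).foldl
    (fun (acc : List String × List String) _ =>
      let level := acc.2.flatMap (fun w => alphabet.map (fun a => w ++ a))
      (acc.1 ++ level, level)) ([], [""])
  let words := wl.1
  if to_sort then
    let rank := (PySem.List.enumerate alphabet).foldl
      (fun d (p : Int × String) => d.setdefault p.2 p.1) (PySem.Dict.empty : PySem.Dict String Int)
    -- rank[c] raises KeyError when c is absent; Pre_ excludes exactly those inputs, so getD 0 is exact
    let pairs := words.map (fun w => (w, w.toList.map (fun c => (rank.get? (String.mk [c])).getD 0)))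
    msdLoop alphabet.length [(pairs, 0)] []
  else words

-- ===== PRECONDITION & SPEC =====
-- Pre_ excludes exactly the inputs on which A raises ValueError (and B raises KeyError): sorting is
-- requested and some generated word contains a character that is not itself an element of alphabet.
def Pre_lex_permutations (alphabet : List String) (length : Int) (to_sort : Bool) : Prop :=
  to_sort = true → (length ≤ 0 ∨ alphabet = [] ∨ alphabet.all (fun a => a.toList.all (fun c => alphabet.contains (String.mk [c]))) = true)
instance (alphabet : List String) (length : Int) (to_sort : Bool) : Decidable (Pre_lex_permutations alphabet length to_sort) := by unfold Pre_lex_permutations; infer_instance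

def pvWitness_lex_permutations : List String × Int × Bool := (["b", "a"], 2, true)

def Spec_lex_permutations (alphabet : List String) (length : Int) (to_sort : Bool) (out : List String) : Prop := out = lex_permutations_alt alphabet length to_sort
instance (alphabet : List String) (length : Int) (to_sort : Bool) (out : List String) : Decidable (Spec_lex_permutations alphabet length to_sort out) := by unfold Spec_lex_permutations; infer_instance

-- ===== CLAIM (what is proved, stated in full; the proofs are below) =====
def Claim_equal_lex_permutations : Prop := ∀ (alphabet : List String) (length : Int) (to_sort : Bool), Dom_lex_permutations alphabet length to_sort → Pre_lex_permutations alphabet length to_sort → Spec_lex_permutations alphabet length to_sort (lex_permutations alphabet length to_sort)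

-- ===== LEMMAS AND PROOFS =====

-- ---------- generation: A's products, joined, are B's level-by-level words ----------
theorem flatten_intersperse_nil (l : List (List Char)) : (List.intersperse [] l).flatten = l.flatten := by
  induction l with
  | nil => rfl
  | cons x xs ih => cases xs <;> simp_all [List.intersperse]

theorem join_nil_str : PySem.Str.join "" ([] : List String) = "" := by
  simp [PySem.Str.join, PySem.Chars.join, List.intercalate]

theorem toList_join_nilsep (p : List String) :
    (PySem.Str.join "" p).toList = (p.map String.toList).flatten := by
  simp [PySem.Str.toList_join, PySem.Chars.join, List.intercalate, flatten_intersperse_nil]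

-- "".join(t + [a]) = "".join(t) + a
theorem join_append_singleton (t : List String) (a : String) :
    PySem.Str.join "" (t ++ [a]) = PySem.Str.join "" t ++ a := by
  apply String.ext
  simp [PySem.Str.toList_join, PySem.Chars.join, List.intercalate, flatten_intersperse_nil]

-- level_n = joined n-fold product
theorem level_eq (alphabet : List String) (n : Nat) :
    ((pyProd alphabet n).map (fun p => PySem.Str.join "" p)).flatMap
        (fun w => alphabet.map (fun a => w ++ a))
      = (pyProd alphabet (n+1)).map (fun p => PySem.Str.join "" p) := by
  simp [pyProd, List.map_flatMap, List.flatMap_map, List.map_map, Function.comp_def,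
    join_append_singleton]

-- generation invariant: A's products, joined, are B's accumulated words; B's level is the joined n-fold product
theorem gen_eq (alphabet : List String) (n : Nat) :
    (((List.range n).foldl (fun prods k => prods ++ pyProd alphabet (k + 1)) []).map
        (fun p => PySem.Str.join "" p)
      = ((List.range n).foldl
          (fun (acc : List String × List String) (_ : Nat) =>
            let level := acc.2.flatMap (fun w => alphabet.map (fun a => w ++ a))
            (acc.1 ++ level, level)) ([], [""])).1)
    ∧ ((List.range n).foldl
          (fun (acc : List String × List String) (_ : Nat) =>
            let level := acc.2.flatMap (fun w => alphabet.map (fun a => w ++ a))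
            (acc.1 ++ level, level)) ([], [""])).2
        = (pyProd alphabet n).map (fun p => PySem.Str.join "" p) := by
  induction n with
  | zero => exact ⟨rfl, by simp [pyProd, join_nil_str]⟩
  | succ n ih =>
    obtain ⟨ih1, ih2⟩ := ih
    rw [List.range_succ, List.foldl_append, List.foldl_append]
    simp only [List.foldl_cons, List.foldl_nil, List.map_append, ih1, ih2, level_eq]
    exact ⟨trivial, trivial⟩

-- ---------- the rank dict is first-index lookup ----------
theorem rank_get (alphabet : List String) (s : String) (i : Int) (d : PySem.Dict String Int) :
    ((PySem.List.enumerate alphabet i).foldl (fun d (p : Int × String) => d.setdefault p.2 p.1) d).get? s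
      = ((d.get? s).orElse (fun _ => (PySem.List.index? alphabet s).map (fun n => i + (n : Int)))) := by
  induction alphabet generalizing i d with
  | nil =>
    simp only [PySem.List.enumerate_nil, List.foldl_nil, PySem.List.index?]
    cases PySem.Dict.get? d s <;> rfl
  | cons x l ih =>
    rw [PySem.List.enumerate_cons]
    simp only [List.foldl_cons, ih]
    by_cases hx : x = s
    · subst hx
      rw [PySem.List.index?_cons_self]
      rcases h : PySem.Dict.get? d x with _ | v
      · simp [PySem.Dict.get?_setdefault_self, h, Option.orElse]
      · simp [PySem.Dict.get?_setdefault_self, h, Option.orElse]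
    · rw [PySem.List.index?_cons_of_ne l hx]
      have hs : PySem.Dict.get? (d.setdefault x i) s = PySem.Dict.get? d s :=
        PySem.Dict.get?_setdefault_of_ne d i (Ne.symm hx)
      rw [hs]
      rcases h : PySem.Dict.get? d s with _ | v
      · simp only [Option.orElse]
        rcases PySem.List.index? l s with _ | n
        · rfl
        · simp only [Option.map_some]
          norm_num
          ring
      · rfl

-- the two per-character rank keys coincide (pointwise)
theorem keys_eq (alphabet : List String) (w : String) :
    w.toList.map (fun c => (((PySem.List.index? alphabet (String.mk [c])).getD 0 : Nat) : Int))
    = w.toList.map (fun c =>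
        (((PySem.List.enumerate alphabet 0).foldl (fun d (p : Int × String) => d.setdefault p.2 p.1)
            (PySem.Dict.empty : PySem.Dict String Int)).get? (String.mk [c])).getD 0) := by
  refine List.map_congr_left (fun c _ => ?_)
  rw [rank_get, PySem.Dict.get?_empty]
  rcases PySem.List.index? alphabet (String.mk [c]) with _ | n
  · rfl
  · simp [Option.orElse]

-- ---------- lexicographic facts on List Int ----------
theorem take_lt_self (l : List Int) (n : Nat) (h : n < l.length) : l.take n < l := by
  induction l generalizing n with
  | nil => simp at h
  | cons x t ih =>
    cases n with
    | zero => exact List.nil_lt_cons x t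
    | succ n =>
      rw [List.take_succ_cons]
      exact List.cons_lt_cons_self.mpr (ih n (by simpa using h))


theorem lt_of_take_eq_get_lt (a b : List Int) (n : Nat) (ha : n < a.length) (hb : n < b.length)
    (ht : a.take n = b.take n) (hg : a[n] < b[n]) : a < b := by
  induction n generalizing a b with
  | zero =>
    cases a with | nil => simp at ha | cons x t =>
    cases b with | nil => simp at hb | cons y u =>
    exact List.cons_lt_cons_iff.mpr (Or.inl (by simpa using hg))
  | succ n ih =>
    cases a with | nil => simp at ha | cons x t =>
    cases b with | nil => simp at hb | cons y u =>
    simp only [List.take_succ_cons, List.cons.injEq] at ht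
    rw [ht.1]
    refine List.cons_lt_cons_self.mpr (ih t u (by simpa using ha) (by simpa using hb) ht.2 ?_)
    simpa using hg


theorem take_succ_eq_of (a b : List Int) (n : Nat) (ha : n < a.length) (hb : n < b.length)
    (ht : a.take n = b.take n) (hg : a[n] = b[n]) : a.take (n+1) = b.take (n+1) := by
  rw [List.take_add_one, List.take_add_one, ht, List.getElem?_eq_getElem ha, List.getElem?_eq_getElem hb, hg]


-- ---------- uniqueness of a key-ordered permutation with member-injective key ----------
theorem stable_sort_unique {alpha kappa : Type} [LinearOrder kappa] (key : alpha → kappa) :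
    ∀ (l₁ l₂ : List alpha), l₁.Perm l₂ → l₁.Pairwise (fun a b => key a ≤ key b) →
      l₂.Pairwise (fun a b => key a ≤ key b) →
      (∀ a ∈ l₁, ∀ b ∈ l₁, key a = key b → a = b) → l₁ = l₂ := by
  intro l₁
  induction l₁ with
  | nil => intro l₂ hp _ _ _; exact (hp.nil_eq).symm ▸ rfl
  | cons a t ih =>
    intro l₂ hp h1 h2 hinj
    cases l₂ with
    | nil => exact absurd hp.symm.nil_eq (by simp)
    | cons b u =>
      have hab : a = b := by
        have hbmem : b ∈ a :: t := hp.symm.subset List.mem_cons_self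
        have hamem : a ∈ b :: u := hp.subset List.mem_cons_self
        rcases List.mem_cons.mp hbmem with h | h
        · exact h.symm
        · rcases List.mem_cons.mp hamem with h' | h'
          · exact h'
          · have hle1 : key a ≤ key b := List.rel_of_pairwise_cons h1 h
            have hle2 : key b ≤ key a := List.rel_of_pairwise_cons h2 h'
            exact hinj a List.mem_cons_self b hbmem (le_antisymm hle1 hle2)
      subst hab
      have htu : t.Perm u := hp.cons_inv
      have := ih u htu (List.pairwise_cons.mp h1).2 (List.pairwise_cons.mp h2).2
        (fun x hx y hy h => hinj x (List.mem_cons_of_mem _ hx) y (List.mem_cons_of_mem _ hy) h)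
      rw [this]


-- ---------- invariants of the radix work-stack loop ----------
def EntryInv (m : Nat) (key : String → List Int) (e : List (String × List Int) × Nat) : Prop :=
  (∀ p ∈ e.1, p.2 = key p.1 ∧ e.2 ≤ p.2.length ∧ ∀ v ∈ p.2, 0 ≤ v ∧ v < (m : Int)) ∧
  (∀ p ∈ e.1, ∀ q ∈ e.1, p.2.take e.2 = q.2.take e.2)

def StackInv (m : Nat) (key : String → List Int) (stack : List (List (String × List Int) × Nat)) : Prop :=
  (∀ e ∈ stack, EntryInv m key e) ∧
  stack.Pairwise (fun e1 e2 => ∀ p ∈ e1.1, ∀ q ∈ e2.1, p.2 ≤ q.2)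

def OutInv (key : String → List Int) (out : List String) (stack : List (List (String × List Int) × Nat)) : Prop :=
  out.Pairwise (fun a b => key a ≤ key b) ∧
  (∀ w ∈ out, ∀ e ∈ stack, ∀ p ∈ e.1, key w ≤ p.2)

theorem bucket_partition_perm (tl : List (String × List Int)) (pos : Nat) (m : Nat)
    (h : ∀ p ∈ tl, 0 ≤ p.2[pos]?.getD 0 ∧ p.2[pos]?.getD 0 < (m : Int)) :
    ((((List.range m).map (fun (r : Nat) => tl.filter (fun p => p.2[pos]?.getD 0 == (r : Int))))).flatten).Perm tl := by
  rw [List.perm_iff_count]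
  intro a
  rw [List.count_flatten, List.map_map]
  have hcnt : ∀ r : Nat, (List.count a (tl.filter (fun p => p.2[pos]?.getD 0 == (r : Int))))
      = if a.2[pos]?.getD 0 == (r : Int) then List.count a tl else 0 := by
    intro r
    by_cases hc : a.2[pos]?.getD 0 == (r : Int)
    · rw [if_pos hc]
      exact List.count_filter hc
    · rw [if_neg hc]
      rw [List.count_eq_zero]
      intro hmem
      have := List.mem_filter.mp hmem
      exact hc this.2
  have : ((List.range m).map (fun (r : Nat) => List.count a (tl.filter (fun p => p.2[pos]?.getD 0 == (r : Int))))).sum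
      = ((List.range m).map (fun (r : Nat) => if a.2[pos]?.getD 0 == (r : Int) then List.count a tl else 0)).sum := by
    exact congrArg _ (List.map_congr_left (fun r _ => hcnt r))
  rw [show (List.map (List.count a ∘ fun (r : Nat) => tl.filter (fun p => p.2[pos]?.getD 0 == (r : Int))) (List.range m)) = ((List.range m).map (fun (r : Nat) => List.count a (tl.filter (fun p => p.2[pos]?.getD 0 == (r : Int))))) from rfl]
  rw [this, sum_indicator_range]
  by_cases hz : List.count a tl = 0
  · rw [hz]; split_ifs <;> rfl
  · have hmem : a ∈ tl := by
      by_contra hnm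
      exact hz (List.count_eq_zero.mpr hnm)
    rw [if_pos (h a hmem)]


def emitP (ps : List (String × List Int)) (pos : Nat) : List (String × List Int) :=
  ps.filter (fun p => p.2.length == pos)
def tlP (ps : List (String × List Int)) (pos : Nat) : List (String × List Int) :=
  ps.filter (fun p => pos < p.2.length)
def bucketsP (m : Nat) (ps : List (String × List Int)) (pos : Nat) : List (List (String × List Int)) :=
  (List.range m).map (fun (r : Nat) => (tlP ps pos).filter (fun p => p.2[pos]?.getD 0 == (r : Int)))
def pushedP (m : Nat) (ps : List (String × List Int)) (pos : Nat) : List (List (String × List Int) × Nat) :=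
  ((bucketsP m ps pos).filter (fun b => !b.isEmpty)).map (fun b => (b, pos + 1))

theorem msdLoop_cons (m : Nat) (ps : List (String × List Int)) (pos : Nat)
    (rest : List (List (String × List Int) × Nat)) (out : List String) :
    msdLoop m ((ps, pos) :: rest) out
      = msdLoop m (pushedP m ps pos ++ rest) (out ++ (emitP ps pos).map (fun p => p.1)) := by
  rw [msdLoop]
  simp only [pushedP, bucketsP, tlP, emitP]

theorem mem_emit (ps : List (String × List Int)) (pos : Nat) {p : String × List Int}
    (h : p ∈ emitP ps pos) : p ∈ ps ∧ p.2.length = pos := by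
  have := List.mem_filter.mp h
  exact ⟨this.1, by simpa using this.2⟩

theorem mem_tl (ps : List (String × List Int)) (pos : Nat) {p : String × List Int}
    (h : p ∈ tlP ps pos) : p ∈ ps ∧ pos < p.2.length := by
  have := List.mem_filter.mp h
  exact ⟨this.1, by simpa using this.2⟩

theorem mem_bucket (m : Nat) (ps : List (String × List Int)) (pos : Nat) {b : List (String × List Int)}
    (hb : b ∈ bucketsP m ps pos) :
    ∃ r : Nat, r < m ∧ b = (tlP ps pos).filter (fun p => p.2[pos]?.getD 0 == (r : Int)) := by
  obtain ⟨r, hr, hb⟩ := List.mem_map.mp hb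
  exact ⟨r, List.mem_range.mp hr, hb.symm⟩

theorem mem_bucket_elt {pos : Nat} {ps b : List (String × List Int)} {r : Nat}
    (hb : b = (tlP ps pos).filter (fun p => p.2[pos]?.getD 0 == (r : Int)))
    {q : String × List Int} (hq : q ∈ b) :
    q ∈ ps ∧ pos < q.2.length ∧ q.2[pos]?.getD 0 = (r : Int) := by
  subst hb
  have h1 := List.mem_filter.mp hq
  obtain ⟨hps, hlen⟩ := mem_tl ps pos h1.1
  exact ⟨hps, hlen, by simpa using h1.2⟩

-- the key of an emitted pair is its whole shared prefix

theorem emit_key_eq {m : Nat} {key : String → List Int} {ps : List (String × List Int)} {pos : Nat}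
    (hE : EntryInv m key (ps, pos)) {p q : String × List Int}
    (hp : p ∈ emitP ps pos) (hq : q ∈ emitP ps pos) : p.2 = q.2 := by
  obtain ⟨hp1, hp2⟩ := mem_emit ps pos hp
  obtain ⟨hq1, hq2⟩ := mem_emit ps pos hq
  have h := hE.2 p hp1 q hq1
  calc p.2 = p.2.take pos := (List.take_of_length_le (by omega)).symm
    _ = q.2.take pos := h
    _ = q.2 := List.take_of_length_le (by omega)

theorem emit_lt_tl {m : Nat} {key : String → List Int} {ps : List (String × List Int)} {pos : Nat}
    (hE : EntryInv m key (ps, pos)) {p q : String × List Int}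
    (hp : p ∈ emitP ps pos) (hq : q ∈ tlP ps pos) : p.2 < q.2 := by
  obtain ⟨hp1, hp2⟩ := mem_emit ps pos hp
  obtain ⟨hq1, hq2⟩ := mem_tl ps pos hq
  have h := hE.2 p hp1 q hq1
  have hpq : p.2 = q.2.take pos := by
    calc p.2 = p.2.take pos := (List.take_of_length_le (by omega)).symm
      _ = q.2.take pos := h
  rw [hpq]
  exact take_lt_self q.2 pos hq2

theorem bucket_lt_bucket {m : Nat} {key : String → List Int} {ps : List (String × List Int)} {pos : Nat}
    (hE : EntryInv m key (ps, pos)) {r r' : Nat} (hrr : r < r')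
    {b b' : List (String × List Int)}
    (hb : b = (tlP ps pos).filter (fun p => p.2[pos]?.getD 0 == (r : Int)))
    (hb' : b' = (tlP ps pos).filter (fun p => p.2[pos]?.getD 0 == (r' : Int)))
    {p q : String × List Int} (hp : p ∈ b) (hq : q ∈ b') : p.2 < q.2 := by
  obtain ⟨hp1, hp2, hp3⟩ := mem_bucket_elt hb hp
  obtain ⟨hq1, hq2, hq3⟩ := mem_bucket_elt hb' hq
  refine lt_of_take_eq_get_lt p.2 q.2 pos hp2 hq2 (hE.2 p hp1 q hq1) ?_
  rw [List.getElem?_eq_getElem hp2] at hp3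
  rw [List.getElem?_eq_getElem hq2] at hq3
  simp only [Option.getD_some] at hp3 hq3
  rw [hp3, hq3]
  exact_mod_cast hrr

theorem bucket_entryinv {m : Nat} {key : String → List Int} {ps : List (String × List Int)} {pos : Nat}
    (hE : EntryInv m key (ps, pos)) {r : Nat}
    {b : List (String × List Int)}
    (hb : b = (tlP ps pos).filter (fun p => p.2[pos]?.getD 0 == (r : Int))) :
    EntryInv m key (b, pos + 1) := by
  constructor
  · intro p hp
    obtain ⟨hp1, hp2, _⟩ := mem_bucket_elt hb hp
    obtain ⟨h1, _, h3⟩ := hE.1 p hp1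
    exact ⟨h1, by omega, h3⟩
  · intro p hp q hq
    obtain ⟨hp1, hp2, hp3⟩ := mem_bucket_elt hb hp
    obtain ⟨hq1, hq2, hq3⟩ := mem_bucket_elt hb hq
    refine take_succ_eq_of p.2 q.2 pos hp2 hq2 (hE.2 p hp1 q hq1) ?_
    rw [List.getElem?_eq_getElem hp2] at hp3
    rw [List.getElem?_eq_getElem hq2] at hq3
    simp only [Option.getD_some] at hp3 hq3
    rw [hp3, hq3]

-- pairs in a pushed bucket come from ps

theorem pushed_sub {m : Nat} {ps : List (String × List Int)} {pos : Nat}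
    {e : List (String × List Int) × Nat} (he : e ∈ pushedP m ps pos)
    {p : String × List Int} (hp : p ∈ e.1) : p ∈ ps := by
  obtain ⟨b, hb, rfl⟩ := List.mem_map.mp he
  have hbb : b ∈ bucketsP m ps pos := List.mem_of_mem_filter hb
  obtain ⟨r, _, hbr⟩ := mem_bucket m ps pos hbb
  exact (mem_bucket_elt hbr hp).1

theorem step_stackinv (m : Nat) (key : String → List Int) (ps : List (String × List Int)) (pos : Nat)
    (rest : List (List (String × List Int) × Nat))
    (hS : StackInv m key ((ps, pos) :: rest)) :
    StackInv m key (pushedP m ps pos ++ rest) := by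
  have hE : EntryInv m key (ps, pos) := hS.1 _ List.mem_cons_self
  have hrest1 : ∀ e ∈ rest, EntryInv m key e := fun e he => hS.1 e (List.mem_cons_of_mem _ he)
  have hcross : ∀ e ∈ rest, ∀ p ∈ ps, ∀ q ∈ e.1, p.2 ≤ q.2 :=
    fun e he p hp q hq => List.rel_of_pairwise_cons hS.2 he p hp q hq
  constructor
  · intro e he
    rcases List.mem_append.mp he with h | h
    · obtain ⟨b, hb, rfl⟩ := List.mem_map.mp h
      obtain ⟨r, _, hbr⟩ := mem_bucket m ps pos (List.mem_of_mem_filter hb)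
      exact bucket_entryinv hE hbr
    · exact hrest1 e h
  · rw [List.pairwise_append]
    refine ⟨?_, (List.pairwise_cons.mp hS.2).2, ?_⟩
    · -- pushed pairwise: buckets in increasing r order
      have hpw : (bucketsP m ps pos).Pairwise
          (fun b b' => ∀ p ∈ b, ∀ q ∈ b', p.2 ≤ q.2) := by
        unfold bucketsP
        refine List.Pairwise.map _ ?_ (List.pairwise_lt_range)
        intro r r' hrr p hp q hq
        exact le_of_lt (bucket_lt_bucket hE hrr rfl rfl hp hq)
      refine List.pairwise_map.mpr ?_
      exact List.Pairwise.sublist (List.filter_sublist (l := bucketsP m ps pos)) hpw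
    · intro e1 h1 e2 h2 p hp q hq
      exact hcross e2 h2 p (pushed_sub h1 hp) q hq

theorem step_outinv (m : Nat) (key : String → List Int) (ps : List (String × List Int)) (pos : Nat)
    (rest : List (List (String × List Int) × Nat)) (out : List String)
    (hS : StackInv m key ((ps, pos) :: rest))
    (hO : OutInv key out ((ps, pos) :: rest)) :
    OutInv key (out ++ (emitP ps pos).map (fun p => p.1)) (pushedP m ps pos ++ rest) := by
  have hE : EntryInv m key (ps, pos) := hS.1 _ List.mem_cons_self
  have hkey : ∀ p ∈ ps, p.2 = key p.1 := fun p hp => (hE.1 p hp).1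
  have hcross : ∀ e ∈ rest, ∀ p ∈ ps, ∀ q ∈ e.1, p.2 ≤ q.2 :=
    fun e he p hp q hq => List.rel_of_pairwise_cons hS.2 he p hp q hq
  constructor
  · rw [List.pairwise_append]
    refine ⟨hO.1, ?_, ?_⟩
    · -- emitted words pairwise (all their keys are equal)
      refine List.pairwise_map.mpr ?_
      refine List.pairwise_of_forall_mem_list ?_
      intro p hp q hq
      have h1 := (hkey p (mem_emit ps pos hp).1).symm
      have h2 := (hkey q (mem_emit ps pos hq).1).symm
      rw [h1, h2, emit_key_eq hE hp hq]
    · intro w hw b hb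
      obtain ⟨p, hp, rfl⟩ := List.mem_map.mp hb
      have hps := (mem_emit ps pos hp).1
      have := hO.2 w hw (ps, pos) List.mem_cons_self p hps
      rw [← hkey p hps]
      exact this
  · intro w hw e he p hp
    rcases List.mem_append.mp hw with hwo | hwe
    · rcases List.mem_append.mp he with h | h
      · exact hO.2 w hwo (ps, pos) List.mem_cons_self p (pushed_sub h hp)
      · exact hO.2 w hwo e (List.mem_cons_of_mem _ h) p hp
    · obtain ⟨q, hq, rfl⟩ := List.mem_map.mp hwe
      have hqe := mem_emit ps pos hq
      rw [← hkey q hqe.1]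
      rcases List.mem_append.mp he with h | h
      · -- p in a pushed bucket: q.2 < p.2
        obtain ⟨b, hb, rfl⟩ := List.mem_map.mp h
        obtain ⟨r, _, hbr⟩ := mem_bucket m ps pos (List.mem_of_mem_filter hb)
        have hptl : p ∈ tlP ps pos := by
          rw [hbr] at hp
          exact List.mem_of_mem_filter hp
        exact le_of_lt (emit_lt_tl hE hq hptl)
      · exact hcross e h q hqe.1 p hp

theorem flatten_filter_ne {α β : Type} (L : List (List α)) (g : List α → List β)
    (hg : g [] = []) :
    ((L.filter (fun b => !b.isEmpty)).map g).flatten = (L.map g).flatten := by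
  induction L with
  | nil => rfl
  | cons b t ih =>
    cases b with
    | nil => simpa [List.filter_cons, hg] using ih
    | cons x u => simpa [List.filter_cons] using congrArg (g (x :: u) ++ ·) ih

theorem step_perm (m : Nat) (key : String → List Int) (ps : List (String × List Int)) (pos : Nat)
    (hE : EntryInv m key (ps, pos)) :
    ((emitP ps pos).map (fun p => p.1) ++ ((pushedP m ps pos).map (fun e => e.1.map (fun p => p.1))).flatten).Perm
      (ps.map (fun p => p.1)) := by
  have h1 : ((pushedP m ps pos).map (fun e => e.1.map (fun p => p.1))).flatten
      = ((bucketsP m ps pos).map (fun b => b.map (fun p => p.1))).flatten := by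
    unfold pushedP
    rw [List.map_map]
    exact flatten_filter_ne _ _ rfl
  rw [h1]
  have h2 : ((bucketsP m ps pos).map (fun b => b.map (fun p => p.1))).flatten
      = ((bucketsP m ps pos).flatten).map (fun p => p.1) := (List.map_flatten).symm
  rw [h2, ← List.map_append]
  refine List.Perm.map _ ?_
  have h3 : ((bucketsP m ps pos).flatten).Perm (tlP ps pos) := by
    unfold bucketsP
    refine bucket_partition_perm (tlP ps pos) pos m ?_
    intro p hp
    obtain ⟨_, hlen⟩ := mem_tl ps pos hp
    rw [List.getElem?_eq_getElem hlen]
    simp only [Option.getD_some]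
    have hmem : p.2[pos] ∈ p.2 := List.getElem_mem hlen
    have := (hE.1 p (mem_tl ps pos hp).1).2.2 _ hmem
    exact this
  refine List.Perm.trans (List.Perm.append_left _ h3) ?_
  have h4 : tlP ps pos = ps.filter (fun p => !(p.2.length == pos)) := by
    unfold tlP
    refine List.filter_congr ?_
    intro p hp
    have hle : pos ≤ p.2.length := (hE.1 p hp).2.1
    by_cases h : p.2.length = pos
    · rw [h]
      simp
    · have hlt : pos < p.2.length := by omega
      simp [hlt, h]
  rw [h4]
  exact List.filter_append_perm _ ps

theorem msd_invariant (m : Nat) (key : String → List Int) :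
    ∀ (N : Nat) (stack : List (List (String × List Int) × Nat)) (out : List String),
      msdMeasure stack + stack.length ≤ N →
      StackInv m key stack → OutInv key out stack →
      (msdLoop m stack out).Pairwise (fun a b => key a ≤ key b)
      ∧ (msdLoop m stack out).Perm (out ++ (stack.map (fun e => e.1.map (fun p => p.1))).flatten) := by
  intro N
  induction N with
  | zero =>
    intro stack out hN hS hO
    cases stack with
    | cons e t => simp only [List.length_cons] at hN; omega
    | nil =>
      rw [msdLoop]
      exact ⟨hO.1, by simp⟩
  | succ N ih =>
    intro stack out hN hS hO
    cases stack with
    | nil =>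
      rw [msdLoop]
      exact ⟨hO.1, by simp⟩
    | cons e rest =>
      obtain ⟨ps, pos⟩ := e
      rw [msdLoop_cons]
      have hdec := msd_decr m ps pos rest
      have hmeas : msdMeasure (pushedP m ps pos ++ rest) + (pushedP m ps pos ++ rest).length ≤ N := by
        unfold pushedP bucketsP tlP at *
        omega
      obtain ⟨hpw, hperm⟩ := ih (pushedP m ps pos ++ rest) (out ++ (emitP ps pos).map (fun p => p.1))
        hmeas (step_stackinv m key ps pos rest hS) (step_outinv m key ps pos rest out hS hO)
      refine ⟨hpw, ?_⟩
      refine hperm.trans ?_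
      have hE : EntryInv m key (ps, pos) := hS.1 _ List.mem_cons_self
      have hsp := step_perm m key ps pos hE
      have h5 := (hsp.append_left out).append_right ((rest.map (fun e => e.1.map (fun p => p.1))).flatten)
      simpa [List.map_append, List.flatten_append, List.append_assoc] using h5

theorem radix_eq_sorted (m : Nat) (key : String → List Int) (words : List String)
    (hrange : ∀ w ∈ words, ∀ v ∈ key w, 0 ≤ v ∧ v < (m : Int))
    (hinj : ∀ w ∈ words, ∀ w' ∈ words, key w = key w' → w = w') :
    msdLoop m [(words.map (fun w => (w, key w)), 0)] [] = PySem.List.sorted words key false := by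
  have hS : StackInv m key [(words.map (fun w => (w, key w)), 0)] := by
    constructor
    · intro e he
      rw [List.mem_singleton.mp he]
      constructor
      · intro p hp
        obtain ⟨w, hw, rfl⟩ := List.mem_map.mp hp
        exact ⟨rfl, Nat.zero_le _, fun v hv => hrange w hw v hv⟩
      · intro p _ q _
        simp
    · exact List.pairwise_singleton _ _
  have hO : OutInv key [] [(words.map (fun w => (w, key w)), 0)] := by
    constructor
    · exact List.Pairwise.nil
    · intro w hw
      cases hw
  obtain ⟨hpw, hperm⟩ := msd_invariant m key
    (msdMeasure [(words.map (fun w => (w, key w)), 0)] + 1) _ [] (le_refl _) hS hO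
  have hperm' : (msdLoop m [(words.map (fun w => (w, key w)), 0)] []).Perm words := by
    refine hperm.trans ?_
    simp [List.map_map, Function.comp_def]
  refine stable_sort_unique key _ _ ?_ hpw ?_ ?_
  · refine hperm'.trans ?_
    have h := (PySem.List.sorted_perm words key false).symm
    convert h using 2
  · have h := PySem.List.sorted_pairwise words key
    convert h using 2
  · intro a ha b hb hk
    exact hinj a (hperm'.subset ha) b (hperm'.subset hb) hk

-- ---------- characters of generated words come from the alphabet ----------
theorem pyProd_mem (alphabet : List String) (n : Nat) :
    ∀ p ∈ pyProd alphabet n, ∀ s ∈ p, s ∈ alphabet := by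
  induction n with
  | zero => intro p hp s hs; simp [pyProd] at hp; subst hp; cases hs
  | succ n ih =>
    intro p hp s hs
    simp only [pyProd, List.mem_flatMap, List.mem_map] at hp
    obtain ⟨t, ht, a, ha, rfl⟩ := hp
    rcases List.mem_append.mp hs with h | h
    · exact ih t ht s h
    · rw [List.mem_singleton.mp h]; exact ha

theorem words_chars (alphabet : List String) (n : Nat) :
    ∀ w ∈ ((List.range n).foldl (fun prods k => prods ++ pyProd alphabet (k + 1)) []).map
        (fun p => PySem.Str.join "" p),
      ∀ c ∈ w.toList, ∃ a ∈ alphabet, c ∈ a.toList := by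
  intro w hw c hc
  rw [PySem.List.foldl_append_eq_flatMap] at hw
  simp only [List.nil_append, List.mem_map, List.mem_flatMap] at hw
  obtain ⟨p, ⟨k, _, hp⟩, rfl⟩ := hw
  rw [toList_join_nilsep] at hc
  obtain ⟨l, hl, hcl⟩ := List.mem_flatten.mp hc
  obtain ⟨a, ha, rfl⟩ := List.mem_map.mp hl
  exact ⟨a, pyProd_mem alphabet (k+1) p hp a ha, hcl⟩


-- index? of a member: some k with k < length and xs[k]? = some v
theorem index?_mem_spec (xs : List String) (v : String) (h : v ∈ xs) :
    ∃ k : Nat, PySem.List.index? xs v = some k ∧ k < xs.length ∧ xs[k]? = some v := by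
  rcases hk : PySem.List.index? xs v with _ | k
  · exact absurd ((PySem.List.index?_eq_none_iff xs v).mp hk) (by simpa using h)
  · obtain ⟨pre, suf, hxs, hlen, _⟩ := (PySem.List.index?_eq_some_iff xs v k).mp hk
    refine ⟨k, rfl, ?_, ?_⟩
    · rw [hxs, List.length_append, ← hlen]
      simp
    · rw [hxs, ← hlen, List.getElem?_append_right (le_refl _)]
      simp

theorem map_injOn {alpha beta : Type} (f : alpha → beta) :
    ∀ (l1 l2 : List alpha), l1.map f = l2.map f →
      (∀ c ∈ l1, ∀ c' ∈ l2, f c = f c' → c = c') → l1 = l2 := by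
  intro l1
  induction l1 with
  | nil => intro l2 h _; cases l2 with | nil => rfl | cons x t => simp at h
  | cons c t ih =>
    intro l2 h hinj
    cases l2 with
    | nil => simp at h
    | cons c' t' =>
      simp only [List.map_cons, List.cons.injEq] at h
      have hc : c = c' := hinj c List.mem_cons_self c' List.mem_cons_self h.1
      rw [hc, ih t' h.2 (fun x hx y hy => hinj x (List.mem_cons_of_mem _ hx) y (List.mem_cons_of_mem _ hy))]

theorem keyA_range (alphabet : List String) (W : List String)
    (hWe : ∀ w ∈ W, ∀ c ∈ w.toList, String.mk [c] ∈ alphabet) :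
    ∀ w ∈ W, ∀ v ∈ w.toList.map (fun c => (((PySem.List.index? alphabet (String.mk [c])).getD 0 : Nat) : Int)),
      0 ≤ v ∧ v < (alphabet.length : Int) := by
  intro w hw v hv
  obtain ⟨c, hc, rfl⟩ := List.mem_map.mp hv
  obtain ⟨k, hk, hklt, _⟩ := index?_mem_spec alphabet _ (hWe w hw c hc)
  rw [hk]
  simp only [Option.getD_some]
  exact ⟨by positivity, by exact_mod_cast hklt⟩

theorem keyA_inj (alphabet : List String) (W : List String)
    (hWe : ∀ w ∈ W, ∀ c ∈ w.toList, String.mk [c] ∈ alphabet) :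
    ∀ w ∈ W, ∀ w' ∈ W,
      w.toList.map (fun c => (((PySem.List.index? alphabet (String.mk [c])).getD 0 : Nat) : Int))
        = w'.toList.map (fun c => (((PySem.List.index? alphabet (String.mk [c])).getD 0 : Nat) : Int))
      → w = w' := by
  intro w hw w' hw' h
  refine String.toList_inj.mp (map_injOn _ _ _ h ?_)
  intro c hc c' hc' hf
  obtain ⟨k, hk, _, hkv⟩ := index?_mem_spec alphabet _ (hWe w hw c hc)
  obtain ⟨k', hk', _, hkv'⟩ := index?_mem_spec alphabet _ (hWe w' hw' c' hc')
  rw [hk, hk'] at hf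
  simp only [Option.getD_some, Int.natCast_inj] at hf
  subst hf
  have hv : some (String.mk [c]) = some (String.mk [c']) := hkv.symm.trans hkv'
  have hv2 : String.ofList [c] = String.ofList [c'] := Option.some_inj.mp hv
  have h2 := congrArg String.toList hv2
  rw [String.toList_ofList, String.toList_ofList] at h2
  exact List.singleton_inj.mp h2

theorem foldl_prods_alphabet_nil (n : Nat) :
    ((List.range n).foldl (fun prods k => prods ++ pyProd ([] : List String) (k + 1)) []) = [] := by
  rw [PySem.List.foldl_append_eq_flatMap]
  simp only [List.nil_append, List.flatMap_eq_nil_iff]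
  intro k _
  simp [pyProd]

-- ===== VERDICT (by name: the statement is the Claim_ definition above) =====
theorem lex_permutations_spec : Claim_equal_lex_permutations := by
  intro alphabet length to_sort _ hpre
  unfold Spec_lex_permutations lex_permutations lex_permutations_alt
  rw [PySem.List.pyRange_one, List.foldl_map, List.foldl_map]
  have hA : (fun (prods : List (List String)) (k : Nat) =>
        prods ++ pyProd alphabet ((0 + (k : Int)) + 1).toNat)
      = (fun prods k => prods ++ pyProd alphabet (k + 1)) := by
    funext prods k
    norm_num
  rw [hA]
  have hg := gen_eq alphabet (length - 0).toNat
  cases to_sort with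
  | false => simpa using hg.1
  | true =>
    simp only
    rw [← hg.1]
    -- W := A's joined list of words
    have hWe : ∀ w ∈ ((List.range (length - 0).toNat).foldl
          (fun prods k => prods ++ pyProd alphabet (k + 1)) []).map (fun p => PySem.Str.join "" p),
        ∀ c ∈ w.toList, String.mk [c] ∈ alphabet := by
      rcases hpre rfl with hlen | hnil | hcov
      · have h0 : (length - 0).toNat = 0 := by omega
        rw [h0]
        intro w hw
        simp at hw
      · subst hnil
        rw [foldl_prods_alphabet_nil]
        intro w hw
        simp at hw
      · intro w hw c hc
        obtain ⟨a, ha, hca⟩ := words_chars alphabet (length - 0).toNat w hw c hc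
        have h1 := List.all_eq_true.mp hcov a ha
        have h2 : ∀ x ∈ a.toList, String.mk [x] ∈ alphabet := by simpa using h1
        exact h2 c hca
    have hpairs : ∀ (W : List String),
        W.map (fun w => (w, w.toList.map (fun c =>
            (((PySem.List.enumerate alphabet 0).foldl (fun d (p : Int × String) => d.setdefault p.2 p.1)
              (PySem.Dict.empty : PySem.Dict String Int)).get? (String.mk [c])).getD 0)))
        = W.map (fun w => (w, w.toList.map (fun c =>
            (((PySem.List.index? alphabet (String.mk [c])).getD 0 : Nat) : Int)))) := by
      intro W
      refine List.map_congr_left (fun w _ => ?_)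
      rw [Prod.mk.injEq]
      exact ⟨rfl, (keys_eq alphabet w).symm⟩
    rw [hpairs]
    exact (radix_eq_sorted alphabet.length _ _ (keyA_range alphabet _ hWe) (keyA_inj alphabet _ hWe)).symm
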